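-- pv_equiv track=rewrite | github.com/mongoose1616/WatchTowerPlan | core/python/src/watchtower_core/repo_ops/query/common.py | query_score
-- ===== SOURCE A (Python) =====
-- from collections.abc import Callable, Iterable
--
-- def normalize_text(value: str) -> str:
--     """Normalize text for case-insensitive matching."""
--     return value.casefold().strip()
--
-- def query_score(query: str | None, fields: Iterable[str]) -> int | None:
--     """Return a simple relevance score or None when the query does not match."""
--     if query is None:
--         return 0
--
--     tokens = [token for token in normalize_text(query).split() if token]
--     if not tokens:
--         return 0
--
--     haystacks = [normalize_text(field) for field in fields if field]
--     score = 0
--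
--     for token in tokens:
--         token_score = 0
--         for haystack in haystacks:
--             if haystack == token:
--                 token_score = max(token_score, 12)
--             elif haystack.startswith(token):
--                 token_score = max(token_score, 8)
--             elif token in haystack:
--                 token_score = max(token_score, 4)
--         if token_score == 0:
--             return None
--         score += token_score
--
--     return score
-- ===== SOURCE B (Python) =====
-- def normalize_text(value):
--     """Normalize text for case-insensitive matching."""
--     return value.casefold().strip()
--
--
-- def query_score(query, fields):
--     """Return a simple relevance score or None when the query does not match."""
--     if query is None:
--         return 0
--
--     tokens = normalize_text(query).split()
--     if not tokens:
--         return 0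
--
--     haystacks = [normalize_text(field) for field in fields if field]
--
--     total = 0
--     for token in tokens:
--         if any(haystack == token for haystack in haystacks):
--             total += 12
--         elif any(haystack.startswith(token) for haystack in haystacks):
--             total += 8
--         elif any(token in haystack for haystack in haystacks):
--             total += 4
--         else:
--             return None
--     return total
-- ===== Notes on version B (the rewrite author's own statement) =====
-- stated objective: simpler
-- what changed: Replaces the inner max-accumulating scan over all haystacks with a short-circuiting priority ladder of any() tests (exact match, then prefix, then substring), dropping the redundant empty-token filter since str.split() never yields empty tokens.
import Mathlib
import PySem

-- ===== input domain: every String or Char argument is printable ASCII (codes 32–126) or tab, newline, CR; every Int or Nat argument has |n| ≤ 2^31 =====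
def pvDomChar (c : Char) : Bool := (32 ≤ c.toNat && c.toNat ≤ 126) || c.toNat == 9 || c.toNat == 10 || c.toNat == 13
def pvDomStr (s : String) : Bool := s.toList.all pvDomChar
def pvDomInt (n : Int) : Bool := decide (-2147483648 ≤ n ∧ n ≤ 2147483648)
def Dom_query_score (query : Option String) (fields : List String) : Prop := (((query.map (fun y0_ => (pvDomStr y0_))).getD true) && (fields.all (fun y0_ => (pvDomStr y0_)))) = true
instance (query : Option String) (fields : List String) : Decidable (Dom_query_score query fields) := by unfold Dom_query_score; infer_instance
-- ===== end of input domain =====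

-- B replaces A's inner max-accumulating scan with a short-circuiting priority ladder of any() tests (simpler; same cost).
-- casefold() is ported as PySem.Str.lower: exact on the ASCII domain Dom_query_score admits.

-- ===== PORT A =====
def pvNormalize (value : String) : String :=
  PySem.Str.strip (PySem.Str.lower value)

def pvALoop (haystacks : List String) : List String → Int → Option Int
  | [], score => some score
  | token :: rest, score =>
    let tokenScore := haystacks.foldl (fun ts haystack =>
      if haystack == token then max ts 12
      else if PySem.Str.startswith haystack token then max ts 8
      else if PySem.Str.isIn token haystack then max ts 4
      else ts) 0
    if tokenScore = 0 then none else pvALoop haystacks rest (score + tokenScore)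

def query_score (query : Option String) (fields : List String) : Option Int :=
  match query with
  | none => some 0
  | some q =>
    let tokens := (PySem.Str.split₀ (pvNormalize q)).filter (fun t => t ≠ "")
    if tokens = [] then some 0
    else
      let haystacks := (fields.filter (fun f => f ≠ "")).map pvNormalize
      pvALoop haystacks tokens 0

-- ===== PORT B =====
def pvBLoop (haystacks : List String) : List String → Int → Option Int
  | [], total => some total
  | token :: rest, total =>
    if haystacks.any (fun h => h == token) then pvBLoop haystacks rest (total + 12)
    else if haystacks.any (fun h => PySem.Str.startswith h token) then pvBLoop haystacks rest (total + 8)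
    else if haystacks.any (fun h => PySem.Str.isIn token h) then pvBLoop haystacks rest (total + 4)
    else none

def query_score_alt (query : Option String) (fields : List String) : Option Int :=
  match query with
  | none => some 0
  | some q =>
    let tokens := PySem.Str.split₀ (pvNormalize q)
    if tokens = [] then some 0
    else
      let haystacks := (fields.filter (fun f => f ≠ "")).map pvNormalize
      pvBLoop haystacks tokens 0

-- ===== PRECONDITION & SPEC =====
def Spec_query_score (query : Option String) (fields : List String) (out : Option Int) : Prop := out = query_score_alt query fields
instance (query : Option String) (fields : List String) (out : Option Int) : Decidable (Spec_query_score query fields out) := by unfold Spec_query_score; infer_instance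

-- ===== CLAIM (what is proved, stated in full; the proofs are below) =====
def Claim_equal_query_score : Prop := ∀ (query : Option String) (fields : List String), Dom_query_score query fields → Spec_query_score query fields (query_score query fields)

-- ===== LEMMAS AND PROOFS =====

-- str.split() (no separator) never yields an empty piece.
theorem pv_split₀_go_ne_nil (s cur : List Char) (acc : List (List Char))
    (hacc : ∀ x ∈ acc, x ≠ []) :
    ∀ x ∈ PySem.Chars.split₀.go s cur acc, x ≠ [] := by
  induction s generalizing cur acc with
  | nil =>
    intro x hx
    simp only [PySem.Chars.split₀.go] at hx
    split at hx
    · exact hacc x (List.mem_reverse.mp hx)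
    · rename_i hcur
      rcases List.mem_cons.mp (List.mem_reverse.mp hx) with h | h
      · subst h
        have hne : cur ≠ [] := fun e => hcur (by simp [e])
        simpa [List.reverse_eq_nil_iff] using hne
      · exact hacc x h
  | cons c rest ih =>
    intro x hx
    simp only [PySem.Chars.split₀.go] at hx
    split at hx
    · split at hx
      · exact ih [] acc hacc x hx
      · rename_i hcur
        refine ih [] (cur.reverse :: acc) ?_ x hx
        intro y hy
        rcases List.mem_cons.mp hy with h | h
        · subst h
          have hne : cur ≠ [] := fun e => hcur (by simp [e])
          simpa [List.reverse_eq_nil_iff] using hne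
        · exact hacc y h
    · exact ih (c :: cur) acc hacc x hx

theorem pv_split₀_ne_empty (s : String) : ∀ t ∈ PySem.Str.split₀ s, t ≠ "" := by
  intro t ht hteq
  have h := PySem.Str.split₀_map_toList s
  have : t.toList ∈ (PySem.Str.split₀ s).map String.toList := List.mem_map_of_mem ht
  rw [h] at this
  have := pv_split₀_go_ne_nil s.toList [] [] (by simp) t.toList this
  subst hteq
  simp at this

-- the Python category score of one haystack against a token
def pvCat (token haystack : String) : Int :=
  if haystack == token then 12
  else if PySem.Str.startswith haystack token then 8
  else if PySem.Str.isIn token haystack then 4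
  else 0

-- the ladder value B computes for one token
def pvLadder (token : String) (hs : List String) : Int :=
  if hs.any (fun h => h == token) then 12
  else if hs.any (fun h => PySem.Str.startswith h token) then 8
  else if hs.any (fun h => PySem.Str.isIn token h) then 4
  else 0

theorem pvLadder_nonneg (token : String) (hs : List String) : 0 ≤ pvLadder token hs := by
  unfold pvLadder; split_ifs <;> norm_num

theorem pvLadder_cons (token h : String) (hs : List String) :
    pvLadder token (h :: hs) = max (pvCat token h) (pvLadder token hs) := by
  unfold pvLadder pvCat
  simp only [List.any_cons, Bool.or_eq_true]
  by_cases h1 : (h == token) = true <;> by_cases h2 : PySem.Str.startswith h token = true <;>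
    by_cases h3 : PySem.Str.isIn token h = true <;>
    simp only [h1, h2, h3, if_true, if_false, true_or, false_or, Bool.false_eq_true] <;>
    split_ifs <;> omega

theorem pv_tokenScore_eq (token : String) (hs : List String) (acc : Int) (h0 : 0 ≤ acc) :
    hs.foldl (fun ts haystack =>
      if haystack == token then max ts 12
      else if PySem.Str.startswith haystack token then max ts 8
      else if PySem.Str.isIn token haystack then max ts 4
      else ts) acc = max acc (pvLadder token hs) := by
  induction hs generalizing acc with
  | nil => simp [pvLadder]; omega
  | cons h t ih =>
    simp only [List.foldl_cons]
    rw [pvLadder_cons]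
    have hstep : (if h == token then max acc 12
        else if PySem.Str.startswith h token then max acc 8
        else if PySem.Str.isIn token h then max acc 4
        else acc) = max acc (pvCat token h) := by
      unfold pvCat; split_ifs <;> omega
    rw [hstep, ih (max acc (pvCat token h)) (by unfold pvCat at *; split_ifs at * <;> omega)]
    omega

theorem pvLoop_eq (hs : List String) (tokens : List String) (score : Int) :
    pvALoop hs tokens score = pvBLoop hs tokens score := by
  induction tokens generalizing score with
  | nil => rfl
  | cons token rest ih =>
    show (let tokenScore := hs.foldl _ 0;
      if tokenScore = 0 then none else pvALoop hs rest (score + tokenScore)) = _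
    rw [show hs.foldl (fun ts haystack =>
      if haystack == token then max ts 12
      else if PySem.Str.startswith haystack token then max ts 8
      else if PySem.Str.isIn token haystack then max ts 4
      else ts) 0 = pvLadder token hs from by
        rw [pv_tokenScore_eq token hs 0 le_rfl]
        exact max_eq_right (pvLadder_nonneg token hs)]
    unfold pvBLoop pvLadder
    by_cases h1 : hs.any (fun h => h == token) = true <;>
      by_cases h2 : hs.any (fun h => PySem.Str.startswith h token) = true <;>
      by_cases h3 : hs.any (fun h => PySem.Str.isIn token h) = true <;>
      simp only [h1, h2, h3, if_true, if_false, Bool.false_eq_true] <;>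
      norm_num <;> exact ih _

-- ===== VERDICT (by name: the statement is the Claim_ definition above) =====
theorem query_score_spec : Claim_equal_query_score := by
  intro query fields _
  unfold Spec_query_score
  cases query with
  | none => rfl
  | some q =>
    unfold query_score query_score_alt
    simp only
    rw [List.filter_eq_self.mpr (by
      intro t ht
      simpa using pv_split₀_ne_empty (pvNormalize q) t ht)]
    split_ifs with h
    · rfl
    · exact pvLoop_eq _ _ 0
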